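-- pv_equiv track=rewrite | github.com/orgitcog/froot | e9.py | _parse_subtrees
-- ===== SOURCE A (Python) =====
-- from typing import List, Set, Dict, Tuple, Any, Optional, Callable
--
-- def _parse_subtrees(s: str) -> List[str]:
--     """Parse a string into its top-level subtree components."""
--     subtrees = []
--     depth = 0
--     current = []
--
--     for char in s:
--         if char == '(':
--             depth += 1
--             current.append(char)
--         elif char == ')':
--             depth -= 1
--             current.append(char)
--             if depth == 0:
--                 subtrees.append(''.join(current))
--                 current = []
--         else:
--             current.append(char)
--
--     return subtrees
-- ===== SOURCE B (Python) =====
-- def _parse_subtrees(s):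
--     """Parse a string into its top-level subtree components."""
--
--     def first_end(i):
--         # index just past the first position where a ')' brings the
--         # balance (counted from position i) back to zero, else None
--         depth = 0
--         while i < len(s):
--             c = s[i]
--             if c == '(':
--                 depth += 1
--             elif c == ')':
--                 depth -= 1
--                 if depth == 0:
--                     return i + 1
--             i += 1
--         return None
--
--     out = []
--     i = 0
--     while True:
--         e = first_end(i)
--         if e is None:
--             return out
--         out.append(s[i:e])
--         i = e
-- ===== Notes on version B (the rewrite author's own statement) =====
-- stated objective: alternative
-- what changed: Instead of one pass that accumulates characters in a buffer and flushes it whenever the depth returns to 0, B repeatedly locates the index just past the next complete top-level subtree with a scanning helper and slices that subtree off the string.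
import Mathlib
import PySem

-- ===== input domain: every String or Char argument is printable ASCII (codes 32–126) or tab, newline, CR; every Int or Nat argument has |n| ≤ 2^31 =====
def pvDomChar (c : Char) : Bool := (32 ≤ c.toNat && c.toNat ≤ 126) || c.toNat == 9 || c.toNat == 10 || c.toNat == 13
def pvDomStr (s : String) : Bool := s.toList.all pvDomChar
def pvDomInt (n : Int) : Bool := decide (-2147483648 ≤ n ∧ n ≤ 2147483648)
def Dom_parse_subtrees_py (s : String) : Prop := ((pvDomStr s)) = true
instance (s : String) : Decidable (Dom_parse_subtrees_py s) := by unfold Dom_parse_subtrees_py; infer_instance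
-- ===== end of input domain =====

-- B replaces A's per-character accumulation buffer by repeatedly locating the end of the
-- next complete top-level subtree and slicing it off (objective: alternative decomposition).

-- ===== PORT A =====
-- literal transliteration of A: one fold over the characters with state
-- (subtrees, depth, current)
def parse_subtrees_py (s : String) : List String :=
  (s.toList.foldl
    (fun (st : List String × Int × List Char) c =>
      let subtrees := st.1
      let depth := st.2.1
      let current := st.2.2
      if c = '(' then (subtrees, depth + 1, current ++ [c])
      else if c = ')' then
        let depth' := depth - 1
        let current' := current ++ [c]
        if depth' = 0 then (subtrees ++ [String.mk current'], depth', [])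
        else (subtrees, depth', current')
      else (subtrees, depth, current ++ [c]))
    ([], 0, [])).1

-- ===== PORT B =====
-- Source B's first_end: scans the suffix starting at index i, returns the offset just past
-- the first ')' that brings the balance back to 0 (the Python index loop over s[i:]
-- becomes structural recursion on the remaining suffix).
def pvFirstEnd (cs : List Char) (depth : Int) : Option Nat :=
  match cs with
  | [] => none
  | c :: rest =>
    if c = '(' then (pvFirstEnd rest (depth + 1)).map (· + 1)
    else if c = ')' then
      if depth - 1 = 0 then some 1
      else (pvFirstEnd rest (depth - 1)).map (· + 1)
    else (pvFirstEnd rest depth).map (· + 1)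

-- pvAltLoop needs this to terminate: a found end is at least 1 and within the suffix.
theorem pvFirstEnd_bounds (cs : List Char) (d : Int) (e : Nat)
    (h : pvFirstEnd cs d = some e) : 1 ≤ e ∧ e ≤ cs.length := by
  induction cs generalizing d e with
  | nil => simp [pvFirstEnd] at h
  | cons c rest ih =>
    simp only [pvFirstEnd] at h
    split_ifs at h with h1 h2 h3
    · rcases Option.map_eq_some_iff.mp h with ⟨e', he', rfl⟩
      have := ih _ _ he'; simp; omega
    · simp at h; simp; omega
    · rcases Option.map_eq_some_iff.mp h with ⟨e', he', rfl⟩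
      have := ih _ _ he'; simp; omega
    · rcases Option.map_eq_some_iff.mp h with ⟨e', he', rfl⟩
      have := ih _ _ he'; simp; omega

-- Source B's outer while-loop: slice off the first complete subtree, continue after it.
def pvAltLoop (cs : List Char) : List String :=
  match h : pvFirstEnd cs 0 with
  | none => []
  | some e => String.mk (cs.take e) :: pvAltLoop (cs.drop e)
termination_by cs.length
decreasing_by
  have := pvFirstEnd_bounds cs 0 e h
  simp; omega

def parse_subtrees_py_alt (s : String) : List String := pvAltLoop s.toList

-- ===== PRECONDITION & SPEC =====
def Spec_parse_subtrees_py (s : String) (out : List String) : Prop := out = parse_subtrees_py_alt s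
instance (s : String) (out : List String) : Decidable (Spec_parse_subtrees_py s out) := by unfold Spec_parse_subtrees_py; infer_instance

-- ===== CLAIM (what is proved, stated in full; the proofs are below) =====
def Claim_equal_parse_subtrees_py : Prop := ∀ (s : String), Dom_parse_subtrees_py s → Spec_parse_subtrees_py s (parse_subtrees_py s)

-- ===== LEMMAS AND PROOFS =====

-- A's loop, restructured: the pending segments emitted from state (depth, current).
def pvSegs (depth : Int) (current : List Char) : List Char → List String
  | [] => []
  | c :: cs =>
    if c = '(' then pvSegs (depth + 1) (current ++ [c]) cs
    else if c = ')' then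
      if depth - 1 = 0 then String.mk (current ++ [c]) :: pvSegs (depth - 1) [] cs
      else pvSegs (depth - 1) (current ++ [c]) cs
    else pvSegs depth (current ++ [c]) cs

theorem foldA_eq_segs (cs : List Char) (acc : List String) (d : Int) (cur : List Char) :
    (cs.foldl
      (fun (st : List String × Int × List Char) c =>
        let subtrees := st.1
        let depth := st.2.1
        let current := st.2.2
        if c = '(' then (subtrees, depth + 1, current ++ [c])
        else if c = ')' then
          let depth' := depth - 1
          let current' := current ++ [c]
          if depth' = 0 then (subtrees ++ [String.mk current'], depth', [])
          else (subtrees, depth', current')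
        else (subtrees, depth, current ++ [c]))
      (acc, d, cur)).1 = acc ++ pvSegs d cur cs := by
  induction cs generalizing acc d cur with
  | nil => simp [pvSegs]
  | cons c cs ih =>
    simp only [List.foldl_cons, pvSegs]
    split_ifs <;> simp [*]

theorem segs_eq_firstEnd (cs : List Char) (d : Int) (cur : List Char) :
    pvSegs d cur cs =
      match pvFirstEnd cs d with
      | none => []
      | some e => String.mk (cur ++ cs.take e) :: pvSegs 0 [] (cs.drop e) := by
  induction cs generalizing d cur with
  | nil => simp [pvSegs, pvFirstEnd]
  | cons c cs ih =>
    simp only [pvSegs, pvFirstEnd]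
    split_ifs with h1 h2 h3
    · rw [ih]
      cases he : pvFirstEnd cs (d + 1) <;> simp [List.take_succ_cons, List.drop_succ_cons]
    · simp [h3, List.take_succ_cons, List.drop_succ_cons]
    · rw [ih]
      cases he : pvFirstEnd cs (d - 1) <;> simp [List.take_succ_cons, List.drop_succ_cons]
    · rw [ih]
      cases he : pvFirstEnd cs d <;> simp [List.take_succ_cons, List.drop_succ_cons]

theorem segs_eq_altLoop (cs : List Char) : pvSegs 0 [] cs = pvAltLoop cs := by
  induction hn : cs.length using Nat.strong_induction_on generalizing cs with
  | _ n ih =>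
    rw [segs_eq_firstEnd, pvAltLoop]
    cases he : pvFirstEnd cs 0 with
    | none => rfl
    | some e =>
      have hb := pvFirstEnd_bounds cs 0 e he
      simp only [List.nil_append]
      congr 1
      subst hn
      exact ih _ (by simp; omega) _ rfl

-- ===== VERDICT (by name: the statement is the Claim_ definition above) =====
theorem parse_subtrees_py_spec : Claim_equal_parse_subtrees_py := by
  intro s _
  unfold Spec_parse_subtrees_py parse_subtrees_py parse_subtrees_py_alt
  rw [foldA_eq_segs, segs_eq_altLoop]
  simp
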